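-- pv_equiv track=rewrite | github.com/altareen/csp | 12FinalExamReview/chap08lists.py | countarticles
-- ===== SOURCE A (Python) =====
-- def countarticles(text):
--     sentence = text.split()
--     result = []
--     articles = ["a", "an", "the"]
--     for word in articles:
--         amount = sentence.count(word)
--         result.append(amount)
--     return result
-- ===== SOURCE B (Python) =====
-- def countarticles(text):
--     a = an = the = 0
--     for word in text.split():
--         if word == "a":
--             a += 1
--         elif word == "an":
--             an += 1
--         elif word == "the":
--             the += 1
--     return [a, an, the]
-- ===== Notes on version B (the rewrite author's own statement) =====
-- stated objective: alternative
-- what changed: Replaces A's three staged .count scans appended into a result list with one single pass over the words carrying three explicit counters updated by an if/elif chain, assembled into the list at the end.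
import Mathlib
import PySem

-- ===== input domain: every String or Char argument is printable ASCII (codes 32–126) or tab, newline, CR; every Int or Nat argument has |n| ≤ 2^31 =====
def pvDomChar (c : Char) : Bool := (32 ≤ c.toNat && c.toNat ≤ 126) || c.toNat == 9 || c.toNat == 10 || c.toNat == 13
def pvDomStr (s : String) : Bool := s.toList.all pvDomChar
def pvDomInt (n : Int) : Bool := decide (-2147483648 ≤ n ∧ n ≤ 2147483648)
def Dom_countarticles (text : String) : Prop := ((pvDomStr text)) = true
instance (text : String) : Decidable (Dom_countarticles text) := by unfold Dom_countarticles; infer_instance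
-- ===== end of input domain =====

-- B makes one pass over the words with three explicit counters (if/elif chain) instead of A's three staged .count scans.

-- ===== PORT A =====
def countarticles (text : String) : List Int :=
  let sentence := PySem.Str.split₀ text
  let articles : List String := ["a", "an", "the"]
  articles.foldl (fun result word => result ++ [(PySem.List.count sentence word : Int)]) []

-- ===== PORT B =====
def countarticles_alt (text : String) : List Int :=
  let c := (PySem.Str.split₀ text).foldl
    (fun (st : Int × Int × Int) word =>
      if word == "a" then (st.1 + 1, st.2.1, st.2.2)
      else if word == "an" then (st.1, st.2.1 + 1, st.2.2)
      else if word == "the" then (st.1, st.2.1, st.2.2 + 1)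
      else st)
    (0, 0, 0)
  [c.1, c.2.1, c.2.2]

-- ===== PRECONDITION & SPEC =====
def Spec_countarticles (text : String) (out : List Int) : Prop := out = countarticles_alt text
instance (text : String) (out : List Int) : Decidable (Spec_countarticles text out) := by unfold Spec_countarticles; infer_instance

-- ===== CLAIM (what is proved, stated in full; the proofs are below) =====
def Claim_equal_countarticles : Prop := ∀ (text : String), Dom_countarticles text → Spec_countarticles text (countarticles text)

-- ===== LEMMAS AND PROOFS =====
theorem pv_fold_counts (l : List String) (x y z : Int) :
    l.foldl
      (fun (st : Int × Int × Int) word =>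
        if word == "a" then (st.1 + 1, st.2.1, st.2.2)
        else if word == "an" then (st.1, st.2.1 + 1, st.2.2)
        else if word == "the" then (st.1, st.2.1, st.2.2 + 1)
        else st)
      (x, y, z)
    = (x + (l.count "a" : Int), y + (l.count "an" : Int), z + (l.count "the" : Int)) := by
  induction l generalizing x y z with
  | nil => simp
  | cons h t ih =>
    rw [List.foldl_cons]
    by_cases ha : h = "a"
    · rw [if_pos (by exact beq_iff_eq.mpr ha), ih]
      subst ha
      simp only [Prod.mk.injEq, List.count_cons]
      refine ⟨?_, ?_, ?_⟩ <;> simp [List.count_cons] <;> ring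
    · rw [if_neg (by simpa using ha)]
      by_cases hn : h = "an"
      · rw [if_pos (by exact beq_iff_eq.mpr hn), ih]
        subst hn
        simp only [Prod.mk.injEq, List.count_cons]
        refine ⟨?_, ?_, ?_⟩ <;> simp [List.count_cons] <;> ring
      · rw [if_neg (by simpa using hn)]
        by_cases ht : h = "the"
        · rw [if_pos (by exact beq_iff_eq.mpr ht), ih]
          subst ht
          simp only [Prod.mk.injEq, List.count_cons]
          refine ⟨?_, ?_, ?_⟩ <;> simp [List.count_cons] <;> ring
        · rw [if_neg (by simpa using ht), ih]
          simp only [Prod.mk.injEq, List.count_cons]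
          refine ⟨?_, ?_, ?_⟩ <;> simp [List.count_cons, ha, hn, ht] <;> try ring

-- ===== VERDICT (by name: the statement is the Claim_ definition above) =====
theorem countarticles_spec : Claim_equal_countarticles := by
  intro text _
  unfold Spec_countarticles countarticles countarticles_alt
  show _ = [_, _, _]
  rw [pv_fold_counts]
  simp [List.foldl, PySem.List.count_eq]
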